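-- pv_equiv track=rewrite | github.com/tmdaidevs/Fabric-Optimize-MCP-Server-Foundry | src/FunctionsMcpTool/tools/semantic_model.py | build_cardinality_distribution
-- ===== SOURCE A (Python) =====
-- from typing import Any, Dict, List, Optional
--
-- def build_cardinality_distribution(stats: List[Dict[str, Any]]) -> str:
--     """Bucket table of cardinality distribution."""
--     buckets = {
--         "1 (constant)": 0,
--         "2-10": 0,
--         "11-100": 0,
--         "101-1K": 0,
--         "1K-10K": 0,
--         "10K-100K": 0,
--         "100K-1M": 0,
--         ">1M": 0,
--     }
--     for s in stats:
--         c = s.get("cardinality", 0)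
--         if c <= 1:
--             buckets["1 (constant)"] += 1
--         elif c <= 10:
--             buckets["2-10"] += 1
--         elif c <= 100:
--             buckets["11-100"] += 1
--         elif c <= 1000:
--             buckets["101-1K"] += 1
--         elif c <= 10000:
--             buckets["1K-10K"] += 1
--         elif c <= 100000:
--             buckets["10K-100K"] += 1
--         elif c <= 1000000:
--             buckets["100K-1M"] += 1
--         else:
--             buckets[">1M"] += 1
--
--     lines = ["| Cardinality Range | Column Count |", "| --- | ---:|"]
--     for k, v in buckets.items():
--         if v > 0:
--             lines.append(f"| {k} | {v} |")
--     return "\n".join(lines)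
-- ===== SOURCE B (Python) =====
-- def build_cardinality_distribution(stats):
--     """Bucket table of cardinality distribution (cumulative-count differencing)."""
--     cards = [s.get("cardinality", 0) for s in stats]
--     le = [sum(1 for c in cards if c <= t)
--           for t in [1, 10, 100, 1000, 10000, 100000, 1000000]]
--     counts = [le[0], le[1] - le[0], le[2] - le[1], le[3] - le[2],
--               le[4] - le[3], le[5] - le[4], le[6] - le[5], len(cards) - le[6]]
--     labels = ["1 (constant)", "2-10", "11-100", "101-1K",
--               "1K-10K", "10K-100K", "100K-1M", ">1M"]
--     header = ["| Cardinality Range | Column Count |", "| --- | ---:|"]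
--     rows = ["| %s | %d |" % (k, v) for k, v in zip(labels, counts) if v > 0]
--     return "\n".join(header + rows)
-- ===== Notes on version B (the rewrite author's own statement) =====
-- stated objective: alternative
-- what changed: Instead of deciding a bucket per element with an if-elif cascade and incrementing a counter, B computes seven cumulative 'count of values <= threshold' passes over the extracted cardinalities and derives each bucket count as the difference of adjacent cumulative counts (the overflow bucket from the total length).
import Mathlib
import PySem

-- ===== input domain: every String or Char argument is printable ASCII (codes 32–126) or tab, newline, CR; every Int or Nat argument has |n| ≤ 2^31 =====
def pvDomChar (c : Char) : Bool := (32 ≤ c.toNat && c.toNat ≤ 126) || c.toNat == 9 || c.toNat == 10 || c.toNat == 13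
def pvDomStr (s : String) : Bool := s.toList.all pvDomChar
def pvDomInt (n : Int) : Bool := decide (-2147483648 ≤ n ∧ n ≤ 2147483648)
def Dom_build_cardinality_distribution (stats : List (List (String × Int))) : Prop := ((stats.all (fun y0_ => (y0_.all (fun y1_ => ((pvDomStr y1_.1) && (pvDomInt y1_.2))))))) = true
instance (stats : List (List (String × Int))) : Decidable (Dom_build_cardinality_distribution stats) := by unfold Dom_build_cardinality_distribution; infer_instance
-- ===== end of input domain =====

-- B replaces A's per-element if-elif bucket cascade with cumulative 'count of values ≤ threshold'
-- passes over the extracted cardinalities, deriving each bucket count by differencing adjacent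
-- cumulative counts (objective: alternative, same cost).

-- ===== PORT A =====
-- one iteration of A's 'for s in stats' loop (the if-elif cascade bumping the dict)
def pvBumpA (b : PySem.Dict String Int) (s : List (String × Int)) : PySem.Dict String Int :=
  let c := (PySem.Dict.mk s).getD "cardinality" 0
  if c ≤ 1 then b.insert "1 (constant)" (b.getD "1 (constant)" 0 + 1)
  else if c ≤ 10 then b.insert "2-10" (b.getD "2-10" 0 + 1)
  else if c ≤ 100 then b.insert "11-100" (b.getD "11-100" 0 + 1)
  else if c ≤ 1000 then b.insert "101-1K" (b.getD "101-1K" 0 + 1)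
  else if c ≤ 10000 then b.insert "1K-10K" (b.getD "1K-10K" 0 + 1)
  else if c ≤ 100000 then b.insert "10K-100K" (b.getD "10K-100K" 0 + 1)
  else if c ≤ 1000000 then b.insert "100K-1M" (b.getD "100K-1M" 0 + 1)
  else b.insert ">1M" (b.getD ">1M" 0 + 1)

def build_cardinality_distribution (stats : List (List (String × Int))) : String :=
  let buckets : PySem.Dict String Int := PySem.Dict.ofList
    [("1 (constant)", 0), ("2-10", 0), ("11-100", 0), ("101-1K", 0),
     ("1K-10K", 0), ("10K-100K", 0), ("100K-1M", 0), (">1M", 0)]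
  let buckets := stats.foldl pvBumpA buckets
  let lines := ["| Cardinality Range | Column Count |", "| --- | ---:|"]
  let lines := buckets.items.foldl
    (fun acc kv => if kv.2 > 0 then acc ++ ["| " ++ kv.1 ++ " | " ++ PySem.Int.toStr kv.2 ++ " |"] else acc)
    lines
  PySem.Str.join "\n" lines

-- ===== PORT B =====
-- Source B's 'sum(1 for c in cards if c <= t)' (a 0/1-sum is a countP, cast to Int)
def pvCountLE (cards : List Int) (t : Int) : Int :=
  (cards.countP (fun c => decide (c ≤ t)) : Int)

def build_cardinality_distribution_alt (stats : List (List (String × Int))) : String :=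
  let cards := stats.map (fun s => (PySem.Dict.mk s).getD "cardinality" 0)
  let le := ([1, 10, 100, 1000, 10000, 100000, 1000000] : List Int).map (pvCountLE cards)
  let counts : List Int :=
    [le.getD 0 0, le.getD 1 0 - le.getD 0 0, le.getD 2 0 - le.getD 1 0,
     le.getD 3 0 - le.getD 2 0, le.getD 4 0 - le.getD 3 0, le.getD 5 0 - le.getD 4 0,
     le.getD 6 0 - le.getD 5 0, (cards.length : Int) - le.getD 6 0]
  let labels : List String := ["1 (constant)", "2-10", "11-100", "101-1K",
                               "1K-10K", "10K-100K", "100K-1M", ">1M"]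
  let header := ["| Cardinality Range | Column Count |", "| --- | ---:|"]
  let rows := ((labels.zip counts).filter (fun kv => kv.2 > 0)).map
    (fun kv => "| " ++ kv.1 ++ " | " ++ PySem.Int.toStr kv.2 ++ " |")
  PySem.Str.join "\n" (header ++ rows)

-- ===== PRECONDITION & SPEC =====
def Spec_build_cardinality_distribution (stats : List (List (String × Int))) (out : String) : Prop := out = build_cardinality_distribution_alt stats
instance (stats : List (List (String × Int))) (out : String) : Decidable (Spec_build_cardinality_distribution stats out) := by unfold Spec_build_cardinality_distribution; infer_instance

-- ===== CLAIM (what is proved, stated in full; the proofs are below) =====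
def Claim_equal_build_cardinality_distribution : Prop := ∀ (stats : List (List (String × Int))), Dom_build_cardinality_distribution stats → Spec_build_cardinality_distribution stats (build_cardinality_distribution stats)

-- ===== LEMMAS AND PROOFS =====

-- A's bucket dict with the eight counts as parameters
def pvMkD (a b c d e f g h : Int) : PySem.Dict String Int :=
  PySem.Dict.mk [("1 (constant)", a), ("2-10", b), ("11-100", c), ("101-1K", d),
                 ("1K-10K", e), ("10K-100K", f), ("100K-1M", g), (">1M", h)]

def pvGetc (s : List (String × Int)) : Int := (PySem.Dict.mk s).getD "cardinality" 0

-- the exact branch predicate of A's cascade for each bucket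
def pvP1 (x : Int) : Bool := decide (x ≤ 1)
def pvP2 (x : Int) : Bool := decide (¬ x ≤ 1 ∧ x ≤ 10)
def pvP3 (x : Int) : Bool := decide (¬ x ≤ 1 ∧ ¬ x ≤ 10 ∧ x ≤ 100)
def pvP4 (x : Int) : Bool := decide (¬ x ≤ 1 ∧ ¬ x ≤ 10 ∧ ¬ x ≤ 100 ∧ x ≤ 1000)
def pvP5 (x : Int) : Bool := decide (¬ x ≤ 1 ∧ ¬ x ≤ 10 ∧ ¬ x ≤ 100 ∧ ¬ x ≤ 1000 ∧ x ≤ 10000)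
def pvP6 (x : Int) : Bool := decide (¬ x ≤ 1 ∧ ¬ x ≤ 10 ∧ ¬ x ≤ 100 ∧ ¬ x ≤ 1000 ∧ ¬ x ≤ 10000 ∧ x ≤ 100000)
def pvP7 (x : Int) : Bool := decide (¬ x ≤ 1 ∧ ¬ x ≤ 10 ∧ ¬ x ≤ 100 ∧ ¬ x ≤ 1000 ∧ ¬ x ≤ 10000 ∧ ¬ x ≤ 100000 ∧ x ≤ 1000000)
def pvP8 (x : Int) : Bool := decide (¬ x ≤ 1 ∧ ¬ x ≤ 10 ∧ ¬ x ≤ 100 ∧ ¬ x ≤ 1000 ∧ ¬ x ≤ 10000 ∧ ¬ x ≤ 100000 ∧ ¬ x ≤ 1000000)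

-- one iteration of A's loop as a case split on the eight cascade branches
theorem pvStepA (a b c d e f g h : Int) (s : List (String × Int)) :
    pvBumpA (pvMkD a b c d e f g h) s =
      if pvGetc s ≤ 1 then pvMkD (a+1) b c d e f g h
      else if pvGetc s ≤ 10 then pvMkD a (b+1) c d e f g h
      else if pvGetc s ≤ 100 then pvMkD a b (c+1) d e f g h
      else if pvGetc s ≤ 1000 then pvMkD a b c (d+1) e f g h
      else if pvGetc s ≤ 10000 then pvMkD a b c d (e+1) f g h
      else if pvGetc s ≤ 100000 then pvMkD a b c d e (f+1) g h
      else if pvGetc s ≤ 1000000 then pvMkD a b c d e f (g+1) h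
      else pvMkD a b c d e f g (h+1) := by
  simp only [pvBumpA, pvMkD, pvGetc]
  split_ifs <;>
    simp [PySem.Dict.insert, PySem.Dict.contains, PySem.Dict.getD, PySem.Dict.get?]

theorem pvMkD_congr {a b c d e f g h a' b' c' d' e' f' g' h' : Int}
    (e1 : a = a') (e2 : b = b') (e3 : c = c') (e4 : d = d')
    (e5 : e = e') (e6 : f = f') (e7 : g = g') (e8 : h = h') :
    pvMkD a b c d e f g h = pvMkD a' b' c' d' e' f' g' h' := by
  rw [e1, e2, e3, e4, e5, e6, e7, e8]

-- A's loop computes, in each bucket, the count of elements satisfying its cascade predicate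
set_option maxHeartbeats 1600000 in
theorem pvFoldA (stats : List (List (String × Int))) :
    ∀ a b c d e f g h : Int,
      stats.foldl pvBumpA (pvMkD a b c d e f g h) =
        pvMkD (a + ((stats.map pvGetc).countP pvP1 : Int))
              (b + ((stats.map pvGetc).countP pvP2 : Int))
              (c + ((stats.map pvGetc).countP pvP3 : Int))
              (d + ((stats.map pvGetc).countP pvP4 : Int))
              (e + ((stats.map pvGetc).countP pvP5 : Int))
              (f + ((stats.map pvGetc).countP pvP6 : Int))
              (g + ((stats.map pvGetc).countP pvP7 : Int))
              (h + ((stats.map pvGetc).countP pvP8 : Int)) := by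
  induction stats with
  | nil => intro a b c d e f g h; simp [List.countP, List.countP.go]
  | cons s rest ih =>
      intro a b c d e f g h
      simp only [List.foldl_cons, List.map_cons, List.countP_cons]
      rw [pvStepA]
      by_cases h1 : pvGetc s ≤ 1
      · rw [if_pos h1]
        rw [ih]
        apply pvMkD_congr <;>
          · simp only [pvP1, pvP2, pvP3, pvP4, pvP5, pvP6, pvP7, pvP8, decide_eq_true_eq]
            split_ifs <;> omega
      rw [if_neg h1]
      by_cases h2 : pvGetc s ≤ 10
      · rw [if_pos h2]
        rw [ih]
        apply pvMkD_congr <;>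
          · simp only [pvP1, pvP2, pvP3, pvP4, pvP5, pvP6, pvP7, pvP8, decide_eq_true_eq]
            split_ifs <;> omega
      rw [if_neg h2]
      by_cases h3 : pvGetc s ≤ 100
      · rw [if_pos h3]
        rw [ih]
        apply pvMkD_congr <;>
          · simp only [pvP1, pvP2, pvP3, pvP4, pvP5, pvP6, pvP7, pvP8, decide_eq_true_eq]
            split_ifs <;> omega
      rw [if_neg h3]
      by_cases h4 : pvGetc s ≤ 1000
      · rw [if_pos h4]
        rw [ih]
        apply pvMkD_congr <;>
          · simp only [pvP1, pvP2, pvP3, pvP4, pvP5, pvP6, pvP7, pvP8, decide_eq_true_eq]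
            split_ifs <;> omega
      rw [if_neg h4]
      by_cases h5 : pvGetc s ≤ 10000
      · rw [if_pos h5]
        rw [ih]
        apply pvMkD_congr <;>
          · simp only [pvP1, pvP2, pvP3, pvP4, pvP5, pvP6, pvP7, pvP8, decide_eq_true_eq]
            split_ifs <;> omega
      rw [if_neg h5]
      by_cases h6 : pvGetc s ≤ 100000
      · rw [if_pos h6]
        rw [ih]
        apply pvMkD_congr <;>
          · simp only [pvP1, pvP2, pvP3, pvP4, pvP5, pvP6, pvP7, pvP8, decide_eq_true_eq]
            split_ifs <;> omega
      rw [if_neg h6]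
      by_cases h7 : pvGetc s ≤ 1000000
      · rw [if_pos h7]
        rw [ih]
        apply pvMkD_congr <;>
          · simp only [pvP1, pvP2, pvP3, pvP4, pvP5, pvP6, pvP7, pvP8, decide_eq_true_eq]
            split_ifs <;> omega
      rw [if_neg h7]
      rw [ih]
      apply pvMkD_congr <;>
        · simp only [pvP1, pvP2, pvP3, pvP4, pvP5, pvP6, pvP7, pvP8, decide_eq_true_eq]
          split_ifs <;> omega

-- counting a cascade bucket by differencing two cumulative counts
theorem pvCountSplit (lo hi : Int) (l : List Int) (p : Int → Bool)
    (hp : ∀ x, p x = decide (¬ x ≤ lo ∧ x ≤ hi)) (hlh : lo ≤ hi) :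
    l.countP (fun x => decide (x ≤ lo)) + l.countP p =
      l.countP (fun x => decide (x ≤ hi)) := by
  induction l with
  | nil => simp [List.countP, List.countP.go]
  | cons c l ih =>
      simp only [List.countP_cons, hp]
      by_cases h1 : c ≤ lo <;> by_cases h2 : c ≤ hi <;> simp [h1, h2] <;> omega

-- the overflow bucket is the total length minus the last cumulative count
theorem pvCountLast (l : List Int) :
    l.countP (fun x => decide (x ≤ 1000000)) + l.countP pvP8 = l.length := by
  induction l with
  | nil => simp [List.countP, List.countP.go]
  | cons c l ih =>
      simp only [List.countP_cons, List.length_cons]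
      by_cases h : c ≤ 1000000
      · have h8 : pvP8 c = false := by simp [pvP8, h]
        simp [h, h8]; omega
      · have h8 : pvP8 c = true := by simp only [pvP8, decide_eq_true_eq]; omega
        simp [h, h8]; omega

-- B's counts list (the port's 'counts' after evaluating the literal-list indexing)
def pvCountsB (cards : List Int) : List Int :=
  [pvCountLE cards 1, pvCountLE cards 10 - pvCountLE cards 1,
   pvCountLE cards 100 - pvCountLE cards 10, pvCountLE cards 1000 - pvCountLE cards 100,
   pvCountLE cards 10000 - pvCountLE cards 1000, pvCountLE cards 100000 - pvCountLE cards 10000,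
   pvCountLE cards 1000000 - pvCountLE cards 100000, (cards.length : Int) - pvCountLE cards 1000000]

-- the two ports with their 'let's zeta-reduced (definitional)
theorem pvA_eq (stats : List (List (String × Int))) :
    build_cardinality_distribution stats =
      PySem.Str.join "\n"
        ((stats.foldl pvBumpA (pvMkD 0 0 0 0 0 0 0 0)).items.foldl
          (fun acc kv => if kv.2 > 0 then acc ++ ["| " ++ kv.1 ++ " | " ++ PySem.Int.toStr kv.2 ++ " |"] else acc)
          ["| Cardinality Range | Column Count |", "| --- | ---:|"]) := rfl

theorem pvB_eq (stats : List (List (String × Int))) :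
    build_cardinality_distribution_alt stats =
      PySem.Str.join "\n"
        (["| Cardinality Range | Column Count |", "| --- | ---:|"] ++
          (((["1 (constant)", "2-10", "11-100", "101-1K",
              "1K-10K", "10K-100K", "100K-1M", ">1M"] : List String).zip
              (pvCountsB (stats.map pvGetc))).filter (fun kv => kv.2 > 0)).map
            (fun kv => "| " ++ kv.1 ++ " | " ++ PySem.Int.toStr kv.2 ++ " |")) := rfl

theorem pvItems (x1 x2 x3 x4 x5 x6 x7 x8 : Int) :
    (pvMkD x1 x2 x3 x4 x5 x6 x7 x8).items =
      [("1 (constant)", x1), ("2-10", x2), ("11-100", x3), ("101-1K", x4),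
       ("1K-10K", x5), ("10K-100K", x6), ("100K-1M", x7), (">1M", x8)] := rfl

-- the A-side items list equals B's labels-zip-counts list, componentwise by the counting lemmas
set_option maxHeartbeats 800000 in
theorem pvListsEq (cards : List Int) :
    ([("1 (constant)", (0:Int) + (cards.countP pvP1 : Int)),
      ("2-10", (0:Int) + (cards.countP pvP2 : Int)),
      ("11-100", (0:Int) + (cards.countP pvP3 : Int)),
      ("101-1K", (0:Int) + (cards.countP pvP4 : Int)),
      ("1K-10K", (0:Int) + (cards.countP pvP5 : Int)),
      ("10K-100K", (0:Int) + (cards.countP pvP6 : Int)),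
      ("100K-1M", (0:Int) + (cards.countP pvP7 : Int)),
      (">1M", (0:Int) + (cards.countP pvP8 : Int))] : List (String × Int)) =
      (["1 (constant)", "2-10", "11-100", "101-1K",
        "1K-10K", "10K-100K", "100K-1M", ">1M"] : List String).zip (pvCountsB cards) := by
  have s2 := pvCountSplit 1 10 cards pvP2 (fun x => rfl) (by norm_num)
  have s3 := pvCountSplit 10 100 cards pvP3
    (fun x => by simp only [pvP3, decide_eq_decide]; omega) (by norm_num)
  have s4 := pvCountSplit 100 1000 cards pvP4
    (fun x => by simp only [pvP4, decide_eq_decide]; omega) (by norm_num)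
  have s5 := pvCountSplit 1000 10000 cards pvP5
    (fun x => by simp only [pvP5, decide_eq_decide]; omega) (by norm_num)
  have s6 := pvCountSplit 10000 100000 cards pvP6
    (fun x => by simp only [pvP6, decide_eq_decide]; omega) (by norm_num)
  have s7 := pvCountSplit 100000 1000000 cards pvP7
    (fun x => by simp only [pvP7, decide_eq_decide]; omega) (by norm_num)
  have s8 := pvCountLast cards
  have s1 : cards.countP pvP1 = cards.countP (fun x => decide (x ≤ 1)) := rfl
  simp only [pvCountsB, pvCountLE, List.zip_cons_cons, List.zip_nil_right,
    List.cons.injEq, Prod.mk.injEq, and_true, true_and]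
  and_intros <;> first | rfl | omega

-- ===== VERDICT (by name: the statement is the Claim_ definition above) =====
set_option maxHeartbeats 1600000 in
theorem build_cardinality_distribution_spec : Claim_equal_build_cardinality_distribution := by
  intro stats _
  show build_cardinality_distribution stats = build_cardinality_distribution_alt stats
  rw [pvA_eq, pvB_eq, pvFoldA, pvItems, PySem.List.foldl_append_ite,
    pvListsEq (stats.map pvGetc)]
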